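-- pv_equiv track=rewrite | github.com/IrinaBoyarchukova/Course_Pyton | 5_lesson/task_5/task5.2.py | all_sets
-- ===== SOURCE A (Python) =====
-- def all_sets(num_list):
--     new_list = []
--     for k in range(len(num_list)):
--         n = num_list[k]
--         temporary = [n]
--         for i in range(k + 1, len(num_list)):
--             if num_list[i] > n:
--                 n = num_list[i]
--                 temporary.append(n)
--         if len(temporary) > 1:
--             new_list.append(temporary)
--
--     return new_list
-- ===== SOURCE B (Python) =====
-- def all_sets(num_list):
--     n = len(num_list)
--     # one left-to-right pass with a monotonic stack: nxt[k] = first j > k with num_list[j] > num_list[k]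
--     nxt = [None] * n
--     stack = []
--     for j in range(n):
--         v = num_list[j]
--         while stack and num_list[stack[-1]] < v:
--             nxt[stack.pop()] = j
--         stack.append(j)
--     result = []
--     for k in range(n):
--         j = nxt[k]
--         if j is None:
--             continue
--         temporary = [num_list[k]]
--         while j is not None:
--             temporary.append(num_list[j])
--             j = nxt[j]
--         result.append(temporary)
--     return result
-- ===== Notes on version B (the rewrite author's own statement) =====
-- stated objective: alternative
-- what changed: Replaces the quadratic per-start rescans with a single monotonic-stack pass that builds a next-greater index array, then emits each run by following the next-greater chain from its start.
import Mathlib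
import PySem

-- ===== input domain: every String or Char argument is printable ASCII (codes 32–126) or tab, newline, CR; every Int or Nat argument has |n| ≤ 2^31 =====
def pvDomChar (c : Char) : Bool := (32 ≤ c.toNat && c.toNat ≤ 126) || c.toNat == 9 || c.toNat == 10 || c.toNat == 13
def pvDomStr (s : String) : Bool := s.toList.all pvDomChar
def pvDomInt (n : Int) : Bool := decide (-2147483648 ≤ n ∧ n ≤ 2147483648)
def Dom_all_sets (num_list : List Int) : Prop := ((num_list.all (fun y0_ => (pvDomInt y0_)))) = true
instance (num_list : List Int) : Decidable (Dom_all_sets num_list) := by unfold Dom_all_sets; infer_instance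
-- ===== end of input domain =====

-- B replaces A's per-start rescans by a monotonic-stack next-greater index array
-- plus chain following (objective: alternative algorithm, same output).


-- ===== PORT A =====
def all_sets (num_list : List Int) : List (List Int) :=
  (PySem.List.pyRange 0 (num_list.length : Int) 1).foldl
    (fun new_list k =>
      let st := (PySem.List.pyRange (k + 1) (num_list.length : Int) 1).foldl
        (fun (st : Int × List Int) i =>
          if st.1 < PySem.List.pyGetD num_list i 0 then
            (PySem.List.pyGetD num_list i 0, st.2 ++ [PySem.List.pyGetD num_list i 0])
          else st)
        (PySem.List.pyGetD num_list k 0, [PySem.List.pyGetD num_list k 0])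
      if 1 < st.2.length then new_list ++ [st.2] else new_list)
    []

-- ===== PORT B =====
-- `while stack and num_list[stack[-1]] < v:` pop-and-assign loop (stack top = list head)
def popLoop (l : List Int) (v : Int) (j : Nat) :
    List (Option Nat) → List Nat → List (Option Nat) × List Nat
  | nxt, [] => (nxt, [])
  | nxt, s :: rest =>
    if l.getD s 0 < v then popLoop l v j (nxt.set s (some j)) rest
    else (nxt, s :: rest)

def buildStep (l : List Int) (st : List (Option Nat) × List Nat) (j : Nat) :
    List (Option Nat) × List Nat :=
  let v := l.getD j 0
  let st' := popLoop l v j st.1 st.2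
  (st'.1, j :: st'.2)

-- one left-to-right pass: nxt[k] = index of the first j > k with num_list[j] > num_list[k]
def buildNxt (l : List Int) : List (Option Nat) :=
  ((List.range l.length).foldl (buildStep l) (List.replicate l.length none, [])).1

-- `while j is not None: temporary.append(num_list[j]); j = nxt[j]` (fuel num_list.length suffices: j strictly increases)
def followChain (l : List Int) (nxt : List (Option Nat)) : Nat → Option Nat → List Int
  | _, none => []
  | 0, some _ => []
  | fuel + 1, some j => l.getD j 0 :: followChain l nxt fuel (nxt.getD j none)

def all_sets_alt (num_list : List Int) : List (List Int) :=
  let nxt := buildNxt num_list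
  (List.range num_list.length).foldl
    (fun result k =>
      match nxt.getD k none with
      | none => result
      | some j =>
          result ++ [num_list.getD k 0 :: followChain num_list nxt num_list.length (some j)])
    []

-- ===== PRECONDITION & SPEC =====
def Spec_all_sets (num_list : List Int) (out : List (List Int)) : Prop := out = all_sets_alt num_list
instance (num_list : List Int) (out : List (List Int)) : Decidable (Spec_all_sets num_list out) := by unfold Spec_all_sets; infer_instance

-- ===== CLAIM (what is proved, stated in full; the proofs are below) =====
def Claim_equal_all_sets : Prop := ∀ (num_list : List Int), Dom_all_sets num_list → Spec_all_sets num_list (all_sets num_list)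

-- ===== LEMMAS AND PROOFS =====

def firstGT (v : Int) : List Int → Nat → Option Nat
  | [], _ => none
  | x :: xs, a => if v < x then some a else firstGT v xs (a + 1)

lemma firstGT_shift (v : Int) (xs : List Int) :
    ∀ a : Nat, firstGT v xs a = (firstGT v xs 0).map (a + ·) := by
  induction xs with
  | nil => intro a; simp [firstGT]
  | cons x xs ih =>
    intro a
    simp only [firstGT]
    by_cases h : v < x
    · simp [h]
    · simp only [h, if_false]
      rw [ih (a + 1), ih 1]
      cases firstGT v xs 0
      · simp
      · simp; omega

lemma firstGT_none_iff (v : Int) (xs : List Int) (a : Nat) :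
    firstGT v xs a = none ↔ ∀ x ∈ xs, ¬ v < x := by
  induction xs generalizing a with
  | nil => simp [firstGT]
  | cons x xs ih =>
    simp only [firstGT]
    by_cases h : v < x
    · simp [h]
    · simp [h, ih]; omega

lemma firstGT_some_iff (v : Int) (xs : List Int) (a j : Nat) :
    firstGT v xs a = some j ↔
      ∃ t : Nat, t < xs.length ∧ j = a + t ∧ v < xs.getD t 0 ∧
        ∀ u : Nat, u < t → ¬ v < xs.getD u 0 := by
  induction xs generalizing a j with
  | nil => simp [firstGT]
  | cons x xs ih =>
    simp only [firstGT]
    by_cases h : v < x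
    · simp only [h, if_true]
      constructor
      · rintro ⟨rfl⟩
        exact ⟨0, by simp, by simp, by simpa using h, by omega⟩
      · rintro ⟨t, ht, rfl, hgt, hmin⟩
        cases t with
        | zero => simp
        | succ t => exact absurd h (by simpa using hmin 0 (by omega))
    · simp only [h, if_false, ih]
      constructor
      · rintro ⟨t, ht, rfl, hgt, hmin⟩
        refine ⟨t + 1, by simpa using ht, by omega, by simpa using hgt, ?_⟩
        intro u hu
        cases u with
        | zero => simpa using h
        | succ u => simpa using hmin u (by omega)
      · rintro ⟨t, ht, rfl, hgt, hmin⟩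
        cases t with
        | zero => exact absurd (by simpa using hgt) h
        | succ t =>
          refine ⟨t, by simpa using ht, by omega, by simpa using hgt, ?_⟩
          intro u hu
          simpa using hmin (u + 1) (by omega)

def greedy (v : Int) : List Int → List Int
  | [] => []
  | x :: xs => if v < x then x :: greedy x xs else greedy v xs

def findNext (l : List Int) (k : Nat) : Option Nat :=
  firstGT (l.getD k 0) (l.drop (k + 1)) (k + 1)

lemma greedy_structure (v : Int) (xs : List Int) :
    greedy v xs = match firstGT v xs 0 with
      | none => []
      | some t => xs.getD t 0 :: greedy (xs.getD t 0) (xs.drop (t + 1)) := by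
  induction xs generalizing v with
  | nil => simp [greedy, firstGT]
  | cons x xs ih =>
    simp only [greedy, firstGT]
    by_cases h : v < x
    · simp [h]
    · simp only [h, if_false]
      rw [ih v, firstGT_shift v xs 1]
      cases hf : firstGT v xs 0 with
      | none => simp
      | some t =>
        simp only [Option.map_some, Nat.add_comm 1 t, List.getD_cons_succ,
          List.drop_succ_cons]

lemma findNext_bounds (l : List Int) (k j : Nat) (h : findNext l k = some j) :
    k < j ∧ j < l.length := by
  rw [findNext, firstGT_some_iff] at h
  obtain ⟨t, ht, rfl, -, -⟩ := h
  simp only [List.length_drop] at ht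
  omega

lemma getD_drop (l : List Int) (a t : Nat) (h : t < (l.drop a).length) :
    (l.drop a).getD t 0 = l.getD (a + t) 0 := by
  rw [List.getD_eq_getElem _ _ h, List.getElem_drop,
      List.getD_eq_getElem _ _ (by simp at h; omega)]

lemma greedy_drop (l : List Int) (k : Nat) :
    greedy (l.getD k 0) (l.drop (k + 1)) =
      match findNext l k with
      | none => []
      | some j => l.getD j 0 :: greedy (l.getD j 0) (l.drop (j + 1)) := by
  rw [greedy_structure, findNext,
      firstGT_shift (l.getD k 0) (l.drop (k + 1)) (k + 1)]
  cases hf : firstGT (l.getD k 0) (l.drop (k + 1)) 0 with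
  | none => simp
  | some t =>
    have ht : t < (l.drop (k + 1)).length := by
      rw [firstGT_some_iff] at hf
      obtain ⟨t', ht', h0, -, -⟩ := hf
      omega
    simp only [Option.map_some]
    rw [getD_drop _ _ _ ht, List.drop_drop]
    congr 2

lemma findNext_eq_some_of (l : List Int) (k m : Nat) (hkm : k < m) (hm : m < l.length)
    (hgt : l.getD k 0 < l.getD m 0)
    (hmid : ∀ j : Nat, k < j → j < m → ¬ l.getD k 0 < l.getD j 0) :
    findNext l k = some m := by
  rw [findNext, firstGT_some_iff]
  refine ⟨m - (k + 1), by simp; omega, by omega, ?_, ?_⟩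
  · rw [getD_drop _ _ _ (by simp; omega)]
    have : k + 1 + (m - (k + 1)) = m := by omega
    rw [this]
    exact hgt
  · intro u hu
    rw [getD_drop _ _ _ (by simp; omega)]
    exact hmid (k + 1 + u) (by omega) (by omega)

lemma findNext_eq_none_of (l : List Int) (k : Nat)
    (hmid : ∀ j : Nat, k < j → j < l.length → ¬ l.getD k 0 < l.getD j 0) :
    findNext l k = none := by
  rw [findNext, firstGT_none_iff]
  intro x hx
  obtain ⟨t, ht, rfl⟩ := List.getElem_of_mem hx
  rw [← List.getD_eq_getElem _ 0 ht, getD_drop _ _ _ ht]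
  exact hmid (k + 1 + t) (by omega) (by simp at ht; omega)

lemma foldl_greedy (xs : List Int) :
    ∀ (v : Int) (acc : List Int),
      xs.foldl (fun (st : Int × List Int) x => if st.1 < x then (x, st.2 ++ [x]) else st) (v, acc)
        = (xs.foldl max v, acc ++ greedy v xs) := by
  induction xs with
  | nil => simp [greedy]
  | cons x xs ih =>
    intro v acc
    simp only [List.foldl_cons, greedy]
    by_cases h : v < x
    · rw [if_pos h, ih, max_eq_right h.le]
      simp [h, List.append_assoc]
    · rw [if_neg h, ih, max_eq_left (by omega)]
      simp [h]

-- ports (scratch copies)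
def runFrom (l : List Int) (k : Nat) : List Int :=
  l.getD k 0 :: greedy (l.getD k 0) (l.drop (k + 1))

lemma all_sets_eq (l : List Int) :
    all_sets l = (List.range l.length).foldl
      (fun acc k => if 1 < (runFrom l k).length then acc ++ [runFrom l k] else acc) [] := by
  unfold all_sets
  rw [PySem.List.pyRange_zero_nat, List.foldl_map]
  apply PySem.List.foldl_congr_mem
  intro acc k hk
  simp only [PySem.List.pyGetD_natCast]
  have hcast : ((k : Int) + 1) = ((k + 1 : Nat) : Int) := by push_cast; ring
  rw [hcast,
    PySem.List.foldl_pyRange_pyGetD' l 0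
      (fun (st : Int × List Int) x => if st.1 < x then (x, st.2 ++ [x]) else st)
      (l.getD k 0, [l.getD k 0]) (by positivity),
    Int.toNat_natCast, foldl_greedy]
  rfl

lemma getD_set_ne {α : Type} (xs : List α) (a b : Nat) (x d : α) (h : b ≠ a) :
    (xs.set a x).getD b d = xs.getD b d := by
  simp [List.getD_eq_getElem?_getD, List.getElem?_set_ne (by omega : a ≠ b)]

lemma getD_set_self {α : Type} (xs : List α) (a : Nat) (x d : α) (h : a < xs.length) :
    (xs.set a x).getD a d = x := by
  simp [List.getD_eq_getElem?_getD, h]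

lemma getD_replicate (n k : Nat) :
    (List.replicate n (none : Option Nat)).getD k none = none := by
  simp only [List.getD_eq_getElem?_getD, List.getElem?_replicate]
  split <;> rfl

def StackInv (l : List Int) (m : Nat) (st : List (Option Nat) × List Nat) : Prop :=
  st.1.length = l.length ∧
  (∀ s ∈ st.2, s < m) ∧
  st.2.Pairwise (· > ·) ∧
  st.2.Pairwise (fun s t => l.getD s 0 ≤ l.getD t 0) ∧
  (∀ s ∈ st.2, ∀ j : Nat, s < j → j < m → ¬ l.getD s 0 < l.getD j 0) ∧
  (∀ s ∈ st.2, st.1.getD s none = none) ∧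
  (∀ k : Nat, k < m → k ∉ st.2 → st.1.getD k none = findNext l k) ∧
  (∀ k : Nat, m ≤ k → st.1.getD k none = none)

lemma popLoop_spec (l : List Int) (m : Nat) (hm : m < l.length) :
    ∀ (stack : List Nat) (nxt : List (Option Nat)),
      StackInv l m (nxt, stack) →
      (popLoop l (l.getD m 0) m nxt stack).1.length = l.length ∧
      (∀ s ∈ (popLoop l (l.getD m 0) m nxt stack).2, s ∈ stack) ∧
      (∀ s ∈ (popLoop l (l.getD m 0) m nxt stack).2,
        ¬ l.getD s 0 < l.getD m 0) ∧
      (popLoop l (l.getD m 0) m nxt stack).2.Pairwise (· > ·) ∧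
      (popLoop l (l.getD m 0) m nxt stack).2.Pairwise (fun s t => l.getD s 0 ≤ l.getD t 0) ∧
      (∀ s ∈ (popLoop l (l.getD m 0) m nxt stack).2,
        (popLoop l (l.getD m 0) m nxt stack).1.getD s none = none) ∧
      (∀ k : Nat, k < m → k ∉ (popLoop l (l.getD m 0) m nxt stack).2 →
        (popLoop l (l.getD m 0) m nxt stack).1.getD k none = findNext l k) ∧
      (∀ k : Nat, m ≤ k → (popLoop l (l.getD m 0) m nxt stack).1.getD k none = none) := by
  intro stack
  induction stack with
  | nil =>
    intro nxt hinv
    obtain ⟨h1, h2, h3, h4, h5, h6, h7, h8⟩ := hinv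
    dsimp only at h1 h7 h8
    simp only [popLoop]
    exact ⟨h1, by simp, by simp, by simp, by simp, by simp, h7, h8⟩
  | cons s rest ih =>
    intro nxt hinv
    obtain ⟨h1, h2, h3, h4, h5, h6, h7, h8⟩ := hinv
    dsimp only at h1 h2 h3 h4 h5 h6 h7 h8
    simp only [popLoop]
    by_cases hlt : l.getD s 0 < l.getD m 0
    · rw [if_pos hlt]
      have hsm : s < m := h2 s (by simp)
      have hsn : s < nxt.length := by omega
      have hs_not_rest : s ∉ rest := by
        intro hmem
        exact absurd (List.rel_of_pairwise_cons h3 hmem) (by omega)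
      have hfn : findNext l s = some m :=
        findNext_eq_some_of l s m hsm hm hlt
          (fun j hj1 hj2 => h5 s (by simp) j hj1 hj2)
      have hinv' : StackInv l m (nxt.set s (some m), rest) := by
        refine ⟨by simp [h1], fun t ht => h2 t (by simp [ht]),
        (List.pairwise_cons.mp h3).2, (List.pairwise_cons.mp h4).2,
        fun t ht j hj1 hj2 => h5 t (by simp [ht]) j hj1 hj2, ?_, ?_, ?_⟩
        · intro t ht
          have hts : t ≠ s := by intro he; exact hs_not_rest (he ▸ ht)
          rw [getD_set_ne _ _ _ _ _ hts]
          exact h6 t (by simp [ht])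
        · intro k hk hknot
          by_cases hks : k = s
          · subst hks
            rw [getD_set_self _ _ _ _ hsn, hfn]
          · rw [getD_set_ne _ _ _ _ _ hks]
            exact h7 k hk (by simp [hknot, hks])
        · intro k hk
          have hks : k ≠ s := by omega
          rw [getD_set_ne _ _ _ _ _ hks]
          exact h8 k hk
      obtain ⟨c1, c2, c3, c4, c5, c6, c7, c8⟩ := ih _ hinv'
      exact ⟨c1, fun t ht => List.mem_cons_of_mem s (c2 t ht), c3, c4, c5, c6, c7, c8⟩
    · rw [if_neg hlt]
      have hvals : ∀ t ∈ s :: rest, ¬ l.getD t 0 < l.getD m 0 := by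
        intro t ht
        rcases List.mem_cons.mp ht with rfl | ht'
        · exact hlt
        · have := List.rel_of_pairwise_cons h4 ht'
          omega
      exact ⟨h1, fun t ht => ht, hvals, h3, h4, h6, h7, h8⟩

lemma stackInv_step (l : List Int) (m : Nat) (hm : m < l.length)
    (st : List (Option Nat) × List Nat) (h : StackInv l m st) :
    StackInv l (m + 1) (buildStep l st m) := by
  obtain ⟨nxt, stack⟩ := st
  obtain ⟨h1, h2, h3, h4, h5, h6, h7, h8⟩ := h
  dsimp only at h2 h5
  obtain ⟨c1, c2, c3, c4, c5, c6, c7, c8⟩ :=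
    popLoop_spec l m hm stack nxt ⟨h1, h2, h3, h4, h5, h6, h7, h8⟩
  unfold buildStep
  dsimp only
  refine ⟨c1, ?_, ?_, ?_, ?_, ?_, ?_, ?_⟩
  · intro t ht
    rcases List.mem_cons.mp ht with rfl | ht'
    · omega
    · have := h2 _ (c2 t ht'); omega
  · refine List.pairwise_cons.mpr ⟨fun t ht => ?_, c4⟩
    have := h2 _ (c2 t ht); omega
  · exact List.pairwise_cons.mpr ⟨fun t ht => by have := c3 t ht; omega, c5⟩
  · intro t ht j hj1 hj2
    rcases List.mem_cons.mp ht with rfl | ht'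
    · omega
    · rcases Nat.lt_or_ge j m with hjm | hjm
      · exact h5 t (c2 t ht') j hj1 hjm
      · have hjm' : j = m := by omega
        subst hjm'
        exact c3 t ht'
  · intro t ht
    rcases List.mem_cons.mp ht with rfl | ht'
    · exact c8 t le_rfl
    · exact c6 t ht'
  · intro k hk hknot
    have hkm : k ≠ m := by simp at hknot; tauto
    exact c7 k (by omega) (by simp at hknot; tauto)
  · intro k hk
    exact c8 k (by omega)

lemma stackInv_init (l : List Int) :
    StackInv l 0 (List.replicate l.length none, []) := by
  refine ⟨by simp, by simp, by simp, by simp, by simp, by simp, by omega, ?_⟩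
  intro k _
  exact getD_replicate l.length k

lemma stackInv_final (l : List Int) :
    StackInv l l.length
      ((List.range l.length).foldl (buildStep l) (List.replicate l.length none, [])) := by
  suffices h : ∀ m : Nat, m ≤ l.length →
      StackInv l m ((List.range m).foldl (buildStep l) (List.replicate l.length none, [])) from
    h l.length le_rfl
  intro m
  induction m with
  | zero => intro _; simpa using stackInv_init l
  | succ m ih =>
    intro hm
    rw [List.range_succ, List.foldl_append, List.foldl_cons, List.foldl_nil]
    exact stackInv_step l m (by omega) _ (ih (by omega))

lemma buildNxt_correct (l : List Int) (k : Nat) (hk : k < l.length) :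
    (buildNxt l).getD k none = findNext l k := by
  obtain ⟨h1, h2, h3, h4, h5, h6, h7, h8⟩ := stackInv_final l
  unfold buildNxt
  by_cases hmem : k ∈ ((List.range l.length).foldl (buildStep l) (List.replicate l.length none, [])).2
  · rw [h6 k hmem, findNext_eq_none_of l k (fun j hj1 hj2 => h5 k hmem j hj1 hj2)]
  · exact h7 k hk hmem

lemma followChain_eq (l : List Int) :
    ∀ (fuel j : Nat), j < l.length → l.length - j ≤ fuel →
      followChain l (buildNxt l) fuel (some j)
        = l.getD j 0 :: greedy (l.getD j 0) (l.drop (j + 1)) := by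
  intro fuel
  induction fuel with
  | zero => intro j hj hf; omega
  | succ fuel ih =>
    intro j hj hf
    rw [followChain, buildNxt_correct l j hj, greedy_drop]
    cases hfn : findNext l j with
    | none => rw [followChain]
    | some j' =>
      obtain ⟨hjj', hj'⟩ := findNext_bounds l j j' hfn
      rw [ih j' hj' (by omega)]

lemma all_sets_alt_eq (l : List Int) :
    all_sets_alt l = (List.range l.length).foldl
      (fun acc k => match findNext l k with
        | none => acc
        | some _ => acc ++ [runFrom l k]) [] := by
  unfold all_sets_alt
  apply PySem.List.foldl_congr_mem
  intro acc k hk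
  have hkl : k < l.length := List.mem_range.mp hk
  rw [buildNxt_correct l k hkl]
  cases hfn : findNext l k with
  | none => rfl
  | some j =>
    obtain ⟨hkj, hj⟩ := findNext_bounds l k j hfn
    dsimp only
    rw [followChain_eq l l.length j hj (by omega)]
    have : runFrom l k = l.getD k 0 :: (l.getD j 0 :: greedy (l.getD j 0) (l.drop (j + 1))) := by
      rw [runFrom, greedy_drop, hfn]
    rw [this]

lemma all_sets_eq_alt (l : List Int) : all_sets l = all_sets_alt l := by
  rw [all_sets_eq, all_sets_alt_eq]
  apply PySem.List.foldl_congr_mem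
  intro acc k hk
  cases hfn : findNext l k with
  | none =>
    have : runFrom l k = [l.getD k 0] := by
      rw [runFrom, greedy_drop, hfn]
    rw [this]
    simp
  | some j =>
    have : runFrom l k = l.getD k 0 :: (l.getD j 0 :: greedy (l.getD j 0) (l.drop (j + 1))) := by
      rw [runFrom, greedy_drop, hfn]
    rw [this]
    simp

-- ===== VERDICT (by name: the statement is the Claim_ definition above) =====
theorem all_sets_spec : Claim_equal_all_sets := by
  intro num_list _
  unfold Spec_all_sets
  exact all_sets_eq_alt num_list
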